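-- pv_equiv track=rewrite | github.com/gsanchz/GFG_POTD | 240103_Smallest_window_containing_0,1,_and_2.py | smallestSubstring
-- ===== SOURCE A (Python) =====
-- def smallestSubstring(S):
--     min_width = 3
--     len_S = len(S)
--     if len_S < min_width:
--         return -1
--     for sum_width in range(len_S - min_width + 1):
--         window_width = 3 + sum_width
--         for start_pos in range(len_S - window_width + 1):
--             final_pos = start_pos + window_width
--             substring = S[start_pos:final_pos]
--             if ('0' in substring) and ('1' in substring) and ('2' in substring):
--                 return window_width
--             else:
--                 pass
--     return -1
-- ===== SOURCE B (Python) =====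
-- def smallestSubstring(S):
--     # One pass: track the last seen index of '0','1','2'; at each position the
--     # smallest good window ending there is i - min(lasts) + 1.
--     last0 = last1 = last2 = -1
--     best = -1
--     for i, ch in enumerate(S):
--         if ch == '0':
--             last0 = i
--         elif ch == '1':
--             last1 = i
--         elif ch == '2':
--             last2 = i
--         if last0 >= 0 and last1 >= 0 and last2 >= 0:
--             width = i - min(last0, last1, last2) + 1
--             if best == -1 or width < best:
--                 best = width
--     return best
-- ===== Notes on version B (the rewrite author's own statement) =====
-- stated objective: faster
-- what changed: Replaced the try-every-width-and-every-start nested scan with a single left-to-right pass that tracks the last seen index of each of '0','1','2' and takes the minimum window ending at each position.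
import Mathlib
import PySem

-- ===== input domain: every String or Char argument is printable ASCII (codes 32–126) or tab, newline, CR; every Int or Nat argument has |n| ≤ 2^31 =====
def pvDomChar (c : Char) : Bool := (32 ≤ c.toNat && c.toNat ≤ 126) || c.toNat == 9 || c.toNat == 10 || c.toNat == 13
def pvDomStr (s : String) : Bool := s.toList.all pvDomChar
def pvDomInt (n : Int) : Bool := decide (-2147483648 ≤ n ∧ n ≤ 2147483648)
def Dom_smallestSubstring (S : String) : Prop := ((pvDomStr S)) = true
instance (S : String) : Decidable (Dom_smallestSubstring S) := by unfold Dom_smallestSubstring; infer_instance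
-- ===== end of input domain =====

-- B replaces A's scan of every width and start position by one pass tracking last occurrences (objective: faster, asymptotic).

-- ===== PORT A =====
-- inner loop: 'for start_pos in range(len_S - window_width + 1)' with early 'return window_width'
def pvAInner (S : List Char) (window_width : Int) : List Int → Option Int
  | [] => none
  | start_pos :: rest =>
    let final_pos := start_pos + window_width
    let substring := PySem.List.slice S (some start_pos) (some final_pos)
    if PySem.Chars.isIn ['0'] substring && PySem.Chars.isIn ['1'] substring
        && PySem.Chars.isIn ['2'] substring then
      some window_width
    else
      pvAInner S window_width rest

-- outer loop: 'for sum_width in range(len_S - min_width + 1)'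
def pvAOuter (S : List Char) (len_S : Int) : List Int → Int
  | [] => -1
  | sum_width :: rest =>
    let window_width := 3 + sum_width
    match pvAInner S window_width (PySem.List.pyRange 0 (len_S - window_width + 1) 1) with
    | some w => w
    | none => pvAOuter S len_S rest

def smallestSubstring (S : String) : Int :=
  let min_width : Int := 3
  let len_S : Int := PySem.Str.len S
  if len_S < min_width then -1
  else pvAOuter S.toList len_S (PySem.List.pyRange 0 (len_S - min_width + 1) 1)

-- ===== PORT B =====
-- one fold step of Source B's loop body; state = (last0, last1, last2, best)
def pvBStep (st : Int × Int × Int × Int) (p : Int × Char) : Int × Int × Int × Int :=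
  let ls :=
    if p.2 = '0' then (p.1, st.2.1, st.2.2.1)
    else if p.2 = '1' then (st.1, p.1, st.2.2.1)
    else if p.2 = '2' then (st.1, st.2.1, p.1)
    else (st.1, st.2.1, st.2.2.1)
  if 0 ≤ ls.1 ∧ 0 ≤ ls.2.1 ∧ 0 ≤ ls.2.2 then
    let width := p.1 - min (min ls.1 ls.2.1) ls.2.2 + 1
    if st.2.2.2 = -1 ∨ width < st.2.2.2 then (ls.1, ls.2.1, ls.2.2, width)
    else (ls.1, ls.2.1, ls.2.2, st.2.2.2)
  else (ls.1, ls.2.1, ls.2.2, st.2.2.2)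

def smallestSubstring_alt (S : String) : Int :=
  ((PySem.List.enumerate S.toList 0).foldl pvBStep (-1, -1, -1, -1)).2.2.2

-- ===== PRECONDITION & SPEC =====
def Spec_smallestSubstring (S : String) (out : Int) : Prop := out = smallestSubstring_alt S
instance (S : String) (out : Int) : Decidable (Spec_smallestSubstring S out) := by unfold Spec_smallestSubstring; infer_instance

-- ===== CLAIM (what is proved, stated in full; the proofs are below) =====
def Claim_equal_smallestSubstring : Prop := ∀ (S : String), Dom_smallestSubstring S → Spec_smallestSubstring S (smallestSubstring S)

-- ===== LEMMAS AND PROOFS =====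

def pvLastOcc : List Char → Char → Int
  | [], _ => -1
  | x :: t, c => if c ∈ t then pvLastOcc t c + 1 else if x = c then 0 else -1

theorem pvLastOcc_nonneg_iff (ys : List Char) (c : Char) : 0 ≤ pvLastOcc ys c ↔ c ∈ ys := by
  induction ys with
  | nil => simp [pvLastOcc]
  | cons x t ih =>
    simp only [pvLastOcc, List.mem_cons]
    split_ifs with h hx
    · have := ih.mpr h
      simp only [h, or_true, iff_true]; omega
    · simp [hx]
    · constructor
      · intro hle; omega
      · rintro (rfl | hm)
        · exact absurd rfl hx
        · exact absurd hm h

theorem pvLastOcc_lt_length (ys : List Char) (c : Char) : pvLastOcc ys c < ys.length := by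
  induction ys with
  | nil => simp [pvLastOcc]
  | cons x t ih =>
    simp only [pvLastOcc, List.length_cons]
    split_ifs with h hx <;> push_cast <;> omega

theorem pvMem_drop_iff (ys : List Char) (c : Char) (l : Nat) :
    c ∈ ys.drop l ↔ (l : Int) ≤ pvLastOcc ys c := by
  induction ys generalizing l with
  | nil => simp [pvLastOcc]; omega
  | cons x t ih =>
    cases l with
    | zero =>
      simpa using (pvLastOcc_nonneg_iff (x :: t) c).symm
    | succ l' =>
      have hd : (x :: t).drop (l' + 1) = t.drop l' := by simp
      rw [hd, ih]
      have key : pvLastOcc (x :: t) c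
          = if c ∈ t then pvLastOcc t c + 1 else if x = c then 0 else -1 := rfl
      by_cases h : c ∈ t
      · have h0 := (pvLastOcc_nonneg_iff t c).mpr h
        rw [key, if_pos h]; push_cast; omega
      · have h0 : ¬ (0 ≤ pvLastOcc t c) := by rw [pvLastOcc_nonneg_iff]; exact h
        rw [key, if_neg h]
        split_ifs <;> push_cast <;> omega

theorem pvLastOcc_append (ys : List Char) (x c : Char) :
    pvLastOcc (ys ++ [x]) c = if x = c then (ys.length : Int) else pvLastOcc ys c := by
  induction ys with
  | nil => by_cases hx : x = c <;> simp [pvLastOcc, hx]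
  | cons y t ih =>
    simp only [List.cons_append, pvLastOcc, List.length_cons]
    by_cases hm : c ∈ t ++ [x]
    · rw [if_pos hm, ih]
      by_cases hx : x = c
      · rw [if_pos hx, if_pos hx]
        push_cast; omega
      · rw [if_neg hx, if_neg hx]
        have h : c ∈ t := by
          rcases List.mem_append.mp hm with h' | h'
          · exact h'
          · simp at h'; exact absurd h'.symm hx
        rw [if_pos h]
    · have hx : ¬ x = c := fun h => hm (by simp [h])
      have h : ¬ c ∈ t := fun h => hm (by simp [h])
      rw [if_neg hm, if_neg hx, if_neg h]

def pvGW (xs : List Char) (l e : Nat) : Prop :=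
  '0' ∈ (xs.take (e+1)).drop l ∧ '1' ∈ (xs.take (e+1)).drop l ∧ '2' ∈ (xs.take (e+1)).drop l

theorem pvGW_iff (xs : List Char) (l e : Nat) :
    pvGW xs l e ↔ (l : Int) ≤ min (min (pvLastOcc (xs.take (e+1)) '0') (pvLastOcc (xs.take (e+1)) '1'))
      (pvLastOcc (xs.take (e+1)) '2') := by
  unfold pvGW
  rw [pvMem_drop_iff, pvMem_drop_iff, pvMem_drop_iff]
  omega

theorem pvThree_le_length (ys : List Char) (h0 : '0' ∈ ys) (h1 : '1' ∈ ys) (h2 : '2' ∈ ys) :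
    3 ≤ ys.length := by
  have hsub : ({'0', '1', '2'} : Finset Char) ⊆ ys.toFinset := by
    intro a ha
    simp only [Finset.mem_insert, Finset.mem_singleton] at ha
    rcases ha with rfl | rfl | rfl <;> simpa
  have h3 : ({'0', '1', '2'} : Finset Char).card = 3 := by decide
  calc 3 = ({'0', '1', '2'} : Finset Char).card := h3.symm
    _ ≤ ys.toFinset.card := Finset.card_le_card hsub
    _ ≤ ys.length := ys.toFinset_card_le

theorem pvMem_singleton_infix {c : Char} {ys : List Char} : [c] <:+: ys ↔ c ∈ ys := by
  constructor
  · intro h; exact List.singleton_sublist.mp h.sublist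
  · intro h
    obtain ⟨s, t, rfl⟩ := List.append_of_mem h
    exact ⟨s, t, by simp⟩


def pvC (xs : List Char) (w l : Int) : Prop :=
  '0' ∈ PySem.List.slice xs (some l) (some (l + w)) ∧
  '1' ∈ PySem.List.slice xs (some l) (some (l + w)) ∧
  '2' ∈ PySem.List.slice xs (some l) (some (l + w))

-- the Bool test of A's inner loop is exactly pvC
theorem pvTest_eq (xs : List Char) (w l : Int) :
    (PySem.Chars.isIn ['0'] (PySem.List.slice xs (some l) (some (l + w))) &&
     PySem.Chars.isIn ['1'] (PySem.List.slice xs (some l) (some (l + w))) &&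
     PySem.Chars.isIn ['2'] (PySem.List.slice xs (some l) (some (l + w)))) = true ↔ pvC xs w l := by
  simp only [Bool.and_eq_true, PySem.Chars.isIn_iff_infix, pvMem_singleton_infix, pvC]
  tauto

theorem pvAInner_none_iff (xs : List Char) (w : Int) (n : Nat) :
    ∀ a b : Int, (b - a).toNat = n →
      (pvAInner xs w (PySem.List.pyRange a b 1) = none ↔
        ∀ l ∈ PySem.List.pyRange a b 1, ¬ pvC xs w l) := by
  induction n with
  | zero =>
    intro a b h
    rw [PySem.List.pyRange_one_eq_nil (by omega)]
    simp [pvAInner]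
  | succ m ih =>
    intro a b h
    rw [PySem.List.pyRange_one_cons (by omega)]
    simp only [pvAInner, List.mem_cons]
    by_cases hc : pvC xs w a
    · rw [if_pos (pvTest_eq xs w a |>.mpr hc)]
      simp only [reduceCtorEq, false_iff]
      push Not
      exact ⟨a, Or.inl rfl, hc⟩
    · rw [if_neg (by
        intro hb
        exact hc ((pvTest_eq xs w a).mp hb))]
      rw [ih (a + 1) b (by omega)]
      constructor
      · intro hall l hl
        rcases hl with rfl | hl
        · exact hc
        · exact hall l hl
      · intro hall l hl
        exact hall l (Or.inr hl)

theorem pvAInner_some (xs : List Char) (w : Int) (n : Nat) :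
    ∀ a b : Int, (b - a).toNat = n →
      (∃ l ∈ PySem.List.pyRange a b 1, pvC xs w l) →
      pvAInner xs w (PySem.List.pyRange a b 1) = some w := by
  induction n with
  | zero =>
    intro a b h hex
    rw [PySem.List.pyRange_one_eq_nil (by omega)] at hex
    simp at hex
  | succ m ih =>
    intro a b h hex
    rw [PySem.List.pyRange_one_cons (by omega)] at hex ⊢
    simp only [pvAInner]
    by_cases hc : pvC xs w a
    · rw [if_pos (pvTest_eq xs w a |>.mpr hc)]
    · rw [if_neg (by intro hb; exact hc ((pvTest_eq xs w a).mp hb))]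
      apply ih (a + 1) b (by omega)
      rcases hex with ⟨l, hl, hcl⟩
      rcases List.mem_cons.mp hl with rfl | hl
      · exact absurd hcl hc
      · exact ⟨l, hl, hcl⟩

theorem pvAOuter_append (xs : List Char) (len : Int) (ws1 ws2 : List Int)
    (h : ∀ sw ∈ ws1, pvAInner xs (3 + sw) (PySem.List.pyRange 0 (len - (3 + sw) + 1) 1) = none) :
    pvAOuter xs len (ws1 ++ ws2) = pvAOuter xs len ws2 := by
  induction ws1 with
  | nil => simp
  | cons sw rest ih =>
    simp only [List.cons_append, pvAOuter]
    rw [h sw (by simp)]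
    exact ih (fun s hs => h s (by simp [hs]))

-- pvC at Nat start/width is a good window
theorem pvC_natCast (xs : List Char) (w l : Nat) :
    pvC xs (w : Int) (l : Int) ↔
      ('0' ∈ (xs.drop l).take w ∧ '1' ∈ (xs.drop l).take w ∧ '2' ∈ (xs.drop l).take w) := by
  unfold pvC
  rw [show ((l : Int) + (w : Int)) = ((l + w : Nat) : Int) by push_cast; ring]
  rw [PySem.List.slice_natCast]
  have : l + w - l = w := by omega
  rw [this]

theorem pvC_iff_GW (xs : List Char) (w l : Nat) (hw : 1 ≤ w) :
    pvC xs (w : Int) (l : Int) ↔ pvGW xs l (l + w - 1) := by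
  rw [pvC_natCast]
  unfold pvGW
  have he : l + w - 1 + 1 = l + w := by omega
  rw [he, List.drop_take]
  have : l + w - l = w := by omega
  rw [this]

theorem pvGW_le (xs : List Char) (l e : Nat) (h : pvGW xs l e) : l ≤ e := by
  obtain ⟨h0, -, -⟩ := h
  by_contra hlt
  rw [List.drop_eq_nil_of_le] at h0
  · simp at h0
  · have : (xs.take (e+1)).length ≤ e + 1 := by rw [List.length_take]; omega
    omega

def pvBestSpec (xs : List Char) (k : Nat) (b : Int) : Prop :=
  (b = -1 ∧ ∀ l e : Nat, e < k → ¬ pvGW xs l e) ∨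
  ((∃ l e : Nat, e < k ∧ pvGW xs l e ∧ b = (e : Int) - l + 1) ∧
    ∀ l e : Nat, e < k → pvGW xs l e → b ≤ (e : Int) - l + 1)

theorem pvB_inv (xs : List Char) (k : Nat) (hk : k ≤ xs.length) :
    ∃ b : Int, (PySem.List.enumerate (xs.take k) 0).foldl pvBStep (-1, -1, -1, -1) =
      (pvLastOcc (xs.take k) '0', pvLastOcc (xs.take k) '1', pvLastOcc (xs.take k) '2', b) ∧
      pvBestSpec xs k b := by
  induction k with
  | zero =>
    refine ⟨-1, by simp [PySem.List.enumerate_nil, pvLastOcc], Or.inl ⟨rfl, by omega⟩⟩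
  | succ m ih =>
    obtain ⟨b, hfold, hspec⟩ := ih (by omega)
    have hm : m < xs.length := by omega
    have htake : xs.take (m + 1) = xs.take m ++ [xs[m]] := by
      rw [List.take_add_one, List.getElem?_eq_getElem hm]
      rfl
    have hlen : (xs.take m).length = m := by
      rw [List.length_take]; omega
    have henum : PySem.List.enumerate (xs.take (m + 1)) 0 =
        PySem.List.enumerate (xs.take m) 0 ++ [((m : Int), xs[m])] := by
      rw [htake, PySem.List.enumerate_append, hlen]
      simp [PySem.List.enumerate_cons, PySem.List.enumerate_nil]
    rw [henum, List.foldl_append, hfold]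
    -- new last-occurrence values
    set x := xs[m] with hx
    have h0 : pvLastOcc (xs.take (m + 1)) '0'
        = if x = '0' then (m : Int) else pvLastOcc (xs.take m) '0' := by
      rw [htake, pvLastOcc_append, hlen]
    have h1 : pvLastOcc (xs.take (m + 1)) '1'
        = if x = '1' then (m : Int) else pvLastOcc (xs.take m) '1' := by
      rw [htake, pvLastOcc_append, hlen]
    have h2 : pvLastOcc (xs.take (m + 1)) '2'
        = if x = '2' then (m : Int) else pvLastOcc (xs.take m) '2' := by
      rw [htake, pvLastOcc_append, hlen]
    set n0 := pvLastOcc (xs.take (m + 1)) '0' with hn0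
    set n1 := pvLastOcc (xs.take (m + 1)) '1' with hn1
    set n2 := pvLastOcc (xs.take (m + 1)) '2' with hn2
    have hls : (if x = '0' then ((m : Int), pvLastOcc (xs.take m) '1', pvLastOcc (xs.take m) '2')
        else if x = '1' then (pvLastOcc (xs.take m) '0', (m : Int), pvLastOcc (xs.take m) '2')
        else if x = '2' then (pvLastOcc (xs.take m) '0', pvLastOcc (xs.take m) '1', (m : Int))
        else (pvLastOcc (xs.take m) '0', pvLastOcc (xs.take m) '1', pvLastOcc (xs.take m) '2'))
        = (n0, n1, n2) := by
      by_cases e0 : x = '0'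
      · rw [if_pos e0] at h0
        rw [if_neg (by rw [e0]; decide)] at h1
        rw [if_neg (by rw [e0]; decide)] at h2
        rw [if_pos e0, h0, h1, h2]
      · rw [if_neg e0] at h0
        by_cases e1 : x = '1'
        · rw [if_pos e1] at h1
          rw [if_neg (by rw [e1]; decide)] at h2
          rw [if_neg e0, if_pos e1, h0, h1, h2]
        · rw [if_neg e1] at h1
          by_cases e2 : x = '2'
          · rw [if_pos e2] at h2
            rw [if_neg e0, if_neg e1, if_pos e2, h0, h1, h2]
          · rw [if_neg e2] at h2
            rw [if_neg e0, if_neg e1, if_neg e2, h0, h1, h2]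
    have hstep : pvBStep (pvLastOcc (xs.take m) '0', pvLastOcc (xs.take m) '1',
        pvLastOcc (xs.take m) '2', b) ((m : Int), x)
        = if 0 ≤ n0 ∧ 0 ≤ n1 ∧ 0 ≤ n2 then
            (if b = -1 ∨ (m : Int) - min (min n0 n1) n2 + 1 < b
              then (n0, n1, n2, (m : Int) - min (min n0 n1) n2 + 1)
              else (n0, n1, n2, b))
          else (n0, n1, n2, b) := by
      unfold pvBStep
      simp only [hls]
    rw [List.foldl_cons, List.foldl_nil, hstep]
    have hGWm : ∀ l : Nat, pvGW xs l m ↔ (l : Int) ≤ min (min n0 n1) n2 := fun l => pvGW_iff xs l m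
    have hbound : min (min n0 n1) n2 < (m : Int) + 1 := by
      have b0 := pvLastOcc_lt_length (xs.take (m + 1)) '0'
      have b1 := pvLastOcc_lt_length (xs.take (m + 1)) '1'
      have b2 := pvLastOcc_lt_length (xs.take (m + 1)) '2'
      have hll : (xs.take (m + 1)).length ≤ m + 1 := by rw [List.length_take]; omega
      rw [← hn0] at b0; rw [← hn1] at b1; rw [← hn2] at b2
      have hc : ((xs.take (m+1)).length : Int) ≤ (m : Int) + 1 := by exact_mod_cast hll
      omega
    by_cases hg : 0 ≤ n0 ∧ 0 ≤ n1 ∧ 0 ≤ n2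
    · rw [if_pos hg]
      set M := min (min n0 n1) n2 with hM
      have hM0 : 0 ≤ M := by omega
      have hwit : pvGW xs M.toNat m := by rw [hGWm]; omega
      have hminl : ∀ l : Nat, pvGW xs l m → (m : Int) - M + 1 ≤ (m : Int) - l + 1 := by
        intro l hgw
        have := (hGWm l).mp hgw
        omega
      by_cases hb : b = -1 ∨ (m : Int) - M + 1 < b
      · rw [if_pos hb]
        refine ⟨(m : Int) - M + 1, rfl, Or.inr ⟨⟨M.toNat, m, by omega, hwit, by omega⟩, ?_⟩⟩
        intro l e he hgw
        rcases Nat.lt_succ_iff_lt_or_eq.mp he with he' | rfl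
        · rcases hspec with ⟨hb1, hnone⟩ | ⟨⟨l', e', he'', hgw', hb'⟩, hmin⟩
          · exact absurd hgw (hnone l e he')
          · have hble := hmin l e he' hgw
            rcases hb with hb | hb
            · have := pvGW_le xs l' e' hgw'
              omega
            · omega
        · exact hminl l hgw
      · rw [if_neg hb]
        rcases hspec with ⟨hb1, _⟩ | ⟨⟨l', e', he'', hgw', hb'⟩, hmin⟩
        · exact absurd (Or.inl hb1) hb
        · refine ⟨b, rfl, Or.inr ⟨⟨l', e', by omega, hgw', hb'⟩, ?_⟩⟩
          intro l e he hgw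
          rcases Nat.lt_succ_iff_lt_or_eq.mp he with he' | rfl
          · exact hmin l e he' hgw
          · have := hminl l hgw
            omega
    · rw [if_neg hg]
      have hnom : ∀ l : Nat, ¬ pvGW xs l m := by
        intro l hgw
        have := (hGWm l).mp hgw
        exact hg (by omega)
      refine ⟨b, rfl, ?_⟩
      rcases hspec with ⟨hb1, hnone⟩ | ⟨⟨l', e', he'', hgw', hb'⟩, hmin⟩
      · refine Or.inl ⟨hb1, ?_⟩
        intro l e he
        rcases Nat.lt_succ_iff_lt_or_eq.mp he with he' | rfl
        · exact hnone l e he'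
        · exact hnom l
      · refine Or.inr ⟨⟨l', e', by omega, hgw', hb'⟩, ?_⟩
        intro l e he hgw
        rcases Nat.lt_succ_iff_lt_or_eq.mp he with he' | rfl
        · exact hmin l e he' hgw
        · exact absurd hgw (hnom l)

-- inner loop fails at width 3+sw whenever every good window's width is handled by `hcontra`
theorem pvInner_fail (xs : List Char) (sw : Int) (hsw : 0 ≤ sw)
    (hcontra : ∀ lN e : Nat, e < xs.length → pvGW xs lN e → ¬ ((e : Int) - lN + 1 = 3 + sw)) :
    pvAInner xs (3 + sw) (PySem.List.pyRange 0 ((xs.length : Int) - (3 + sw) + 1) 1) = none := by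
  apply (pvAInner_none_iff xs (3 + sw) (((xs.length : Int) - (3 + sw) + 1) - 0).toNat 0 _ rfl).mpr
  intro l hl hC
  rw [PySem.List.mem_pyRange_one] at hl
  obtain ⟨hl0, hl1⟩ := hl
  have e2 : l = ((l.toNat : Nat) : Int) := by omega
  have e1 : (3 + sw) = (((3 + sw.toNat : Nat)) : Int) := by omega
  rw [e1, e2] at hC
  rw [pvC_iff_GW xs (3 + sw.toNat) l.toNat (by omega)] at hC
  refine hcontra l.toNat (l.toNat + (3 + sw.toNat) - 1) (by omega) hC ?_
  omega

theorem pvMain (S : String) : smallestSubstring S = smallestSubstring_alt S := by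
  obtain ⟨b, hfold, hspec⟩ := pvB_inv S.toList S.toList.length (le_refl _)
  rw [List.take_length] at hfold
  have hB : smallestSubstring_alt S = b := by
    unfold smallestSubstring_alt
    rw [hfold]
  rw [hB]
  unfold smallestSubstring
  simp only [PySem.Str.len_eq]
  rcases hspec with ⟨hb1, hnone⟩ | ⟨⟨l', e', he', hgw', hb'⟩, hmin⟩
  · -- no good window anywhere: A returns -1 = b
    by_cases hlt : ((S.toList.length : Int)) < 3
    · rw [if_pos hlt, hb1]
    · rw [if_neg hlt]
      rw [← List.append_nil (PySem.List.pyRange 0 ((S.toList.length : Int) - 3 + 1) 1)]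
      rw [pvAOuter_append S.toList _ _ _ ?_]
      · simp [pvAOuter, hb1]
      · intro sw hsw
        rw [PySem.List.mem_pyRange_one] at hsw
        exact pvInner_fail S.toList sw hsw.1
          (fun lN e he hgw _ => hnone lN e he hgw)
  · -- minimal window (l', e') of width b: A returns b
    have hle := pvGW_le S.toList l' e' hgw'
    have h3b : 3 ≤ b := by
      obtain ⟨m0, m1, m2⟩ := hgw'
      have h3 := pvThree_le_length _ m0 m1 m2
      have hL : ((S.toList.take (e' + 1)).drop l').length = e' + 1 - l' := by
        rw [List.length_drop, List.length_take]
        omega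
      rw [hL] at h3
      omega
    have hbn : b ≤ (S.toList.length : Int) := by omega
    rw [if_neg (by omega)]
    rw [PySem.List.pyRange_one_append 0 (b - 3) ((S.toList.length : Int) - 3 + 1) (by omega) (by omega)]
    rw [pvAOuter_append S.toList _ _ _ ?_]
    · rw [PySem.List.pyRange_one_cons (by omega : b - 3 < (S.toList.length : Int) - 3 + 1)]
      simp only [pvAOuter]
      have e3 : (3 : Int) + (b - 3) = b := by ring
      rw [e3]
      have hsome : pvAInner S.toList b
          (PySem.List.pyRange 0 ((S.toList.length : Int) - b + 1) 1) = some b := by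
        apply pvAInner_some S.toList b (((S.toList.length : Int) - b + 1) - 0).toNat 0 _ rfl
        refine ⟨(l' : Int), ?_, ?_⟩
        · rw [PySem.List.mem_pyRange_one]
          omega
        · have e4 : b = ((e' + 1 - l' : Nat) : Int) := by omega
          rw [e4]
          apply (pvC_iff_GW S.toList (e' + 1 - l') l' (by omega)).mpr
          have e5 : l' + (e' + 1 - l') - 1 = e' := by omega
          rw [e5]
          exact hgw'
      rw [hsome]
    · intro sw hsw
      rw [PySem.List.mem_pyRange_one] at hsw
      apply pvInner_fail S.toList sw hsw.1
      intro lN e he hgw hw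
      have := hmin lN e he hgw
      omega

-- ===== VERDICT (by name: the statement is the Claim_ definition above) =====
theorem smallestSubstring_spec : Claim_equal_smallestSubstring := by
  intro S _
  unfold Spec_smallestSubstring
  exact pvMain S
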